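-- pv_equiv track=rewrite | github.com/robertschaub/FactHarbor | Docs/xwiki-export/OLD_MARKDOWN_WORKFLOW/json_to_md_tree.py | sanitize_path_component
-- ===== SOURCE A (Python) =====
-- def sanitize_path_component(name: str) -> str:
--     """
--     Sanitize a path component for Windows/Unix filesystems.
--     Replaces invalid characters with safe alternatives.
--     """
--     # Windows invalid chars: < > : " / \ | ? *
--     replacements = {
--         '<': '(lt)',
--         '>': '(gt)',
--         ':': '-',
--         '"': "'",
--         '/': '-',
--         '\\': '-',
--         '|': '-',
--         '?': '',
--         '*': ''
--     }
--
--     result = name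
--     for char, replacement in replacements.items():
--         result = result.replace(char, replacement)
--
--     # Remove trailing dots/spaces (Windows issue)
--     result = result.rstrip('. ')
--
--     return result
-- ===== SOURCE B (Python) =====
-- def sanitize_path_component(name: str) -> str:
--     """
--     Sanitize a path component for Windows/Unix filesystems.
--     Single pass: map each character through the replacement table,
--     then trim trailing dots/spaces.
--     """
--     replacements = {
--         '<': '(lt)',
--         '>': '(gt)',
--         ':': '-',
--         '"': "'",
--         '/': '-',
--         '\\': '-',
--         '|': '-',
--         '?': '',
--         '*': ''
--     }
--
--     parts = []
--     for ch in name: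
--         parts.append(replacements.get(ch, ch))
--
--     return ''.join(parts).rstrip('. ')
-- ===== Notes on version B (the rewrite author's own statement) =====
-- stated objective: alternative
-- what changed: B builds the result in one character-by-character pass using the replacement table (no replacement output contains a table key, so this equals A's nine sequential full-string replace passes), then applies the same rstrip('. ').
import Mathlib
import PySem

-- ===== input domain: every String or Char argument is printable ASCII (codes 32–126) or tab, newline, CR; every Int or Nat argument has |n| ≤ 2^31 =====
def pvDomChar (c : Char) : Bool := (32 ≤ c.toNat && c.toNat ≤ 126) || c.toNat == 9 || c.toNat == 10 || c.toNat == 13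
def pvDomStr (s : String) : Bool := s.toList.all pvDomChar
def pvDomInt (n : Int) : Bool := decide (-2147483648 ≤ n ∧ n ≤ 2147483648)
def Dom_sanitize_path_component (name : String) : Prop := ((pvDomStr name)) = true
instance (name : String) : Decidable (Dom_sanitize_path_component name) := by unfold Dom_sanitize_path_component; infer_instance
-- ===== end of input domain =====

-- B replaces A's nine sequential full-string replace passes with one char-by-char table-lookup pass (same result).
-- Python's result.rstrip('. ') (shared verbatim by A and B); PySem has no rstrip-with-chars,
-- so it is ported by hand: drop trailing chars that are '.' or ' ' — exact for this call.
def pyRstripDotSpace (cs : List Char) : List Char :=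
  (cs.reverse.dropWhile (fun c => c == '.' || c == ' ')).reverse

-- ===== PORT A =====
-- Literal port of A: nine sequential str.replace passes (dict iteration order), then rstrip('. ').
def sanitize_path_component (name : String) : String :=
  let r1 := PySem.Str.replace name "<" "(lt)"
  let r2 := PySem.Str.replace r1 ">" "(gt)"
  let r3 := PySem.Str.replace r2 ":" "-"
  let r4 := PySem.Str.replace r3 "\"" "'"
  let r5 := PySem.Str.replace r4 "/" "-"
  let r6 := PySem.Str.replace r5 "\\" "-"
  let r7 := PySem.Str.replace r6 "|" "-"
  let r8 := PySem.Str.replace r7 "?" ""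
  let r9 := PySem.Str.replace r8 "*" ""
  String.ofList (pyRstripDotSpace r9.toList)

-- ===== PORT B =====
-- replacements.get(ch, ch) of Source B as a function Char → String
def pvBMap (c : Char) : String :=
  if c = '<' then "(lt)"
  else if c = '>' then "(gt)"
  else if c = ':' then "-"
  else if c = '"' then "'"
  else if c = '/' then "-"
  else if c = '\\' then "-"
  else if c = '|' then "-"
  else if c = '?' then ""
  else if c = '*' then ""
  else String.ofList [c]

-- Literal port of B: one pass appending the mapped piece for each character, then rstrip('. ').
def sanitize_path_component_alt (name : String) : String :=
  let parts := name.toList.foldl (fun acc c => acc ++ (pvBMap c).toList) []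
  String.ofList (pyRstripDotSpace parts)

-- ===== PRECONDITION & SPEC =====
def Spec_sanitize_path_component (name : String) (out : String) : Prop := out = sanitize_path_component_alt name
instance (name : String) (out : String) : Decidable (Spec_sanitize_path_component name out) := by unfold Spec_sanitize_path_component; infer_instance

-- ===== CLAIM (what is proved, stated in full; the proofs are below) =====
def Claim_equal_sanitize_path_component : Prop := ∀ (name : String), Dom_sanitize_path_component name → Spec_sanitize_path_component name (sanitize_path_component name)

-- ===== LEMMAS AND PROOFS =====

-- A replace with a single-character pattern is a per-character flatMap.
lemma replace_go_single (k : Char) (new : List Char) :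
    ∀ (fuel : Nat) (l acc : List Char), l.length ≤ fuel →
      PySem.Chars.replace.go [k] new fuel l acc
        = acc.reverse ++ l.flatMap (fun c => if c = k then new else [c]) := by
  intro fuel
  induction fuel with
  | zero =>
    intro l acc h
    have : l = [] := List.eq_nil_of_length_eq_zero (Nat.le_zero.mp h)
    subst this
    simp [PySem.Chars.replace.go]
  | succ n ih =>
    intro l acc h
    cases l with
    | nil => simp [PySem.Chars.replace.go]
    | cons c t =>
      by_cases hc : c = k
      · subst hc
        have hpre : List.isPrefixOf [c] (c :: t) = true := by
          simp [List.isPrefixOf]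
        rw [PySem.Chars.replace.go]
        simp only [hpre, if_true, List.length, List.drop]
        rw [ih t (new.reverse ++ acc) (by simpa using Nat.le_of_succ_le_succ h)]
        simp
      · have hpre : List.isPrefixOf [k] (c :: t) = false := by
          simp [List.isPrefixOf]
          exact fun h' => absurd h'.symm hc
        rw [PySem.Chars.replace.go]
        simp only [hpre, Bool.false_eq_true, if_false]
        rw [ih t (c :: acc) (by simpa using Nat.le_of_succ_le_succ h)]
        simp [hc]

lemma replace_single (s : List Char) (k : Char) (new : List Char) :
    PySem.Chars.replace s [k] new = s.flatMap (fun c => if c = k then new else [c]) := by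
  rw [PySem.Chars.replace]
  simp only [List.isEmpty_cons, Bool.false_eq_true, if_false]
  simpa using replace_go_single k new s.length s [] (Nat.le_refl _)

-- composing the nine per-character substitutions is pvBMap
lemma nine_eq_bmap (c : Char) :
    ((if c = '<' then ['(','l','t',')'] else [c]).flatMap (fun c =>
     (if c = '>' then ['(','g','t',')'] else [c]).flatMap (fun c =>
     (if c = ':' then ['-'] else [c]).flatMap (fun c =>
     (if c = '"' then ['\''] else [c]).flatMap (fun c =>
     (if c = '/' then ['-'] else [c]).flatMap (fun c =>
     (if c = '\\' then ['-'] else [c]).flatMap (fun c =>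
     (if c = '|' then ['-'] else [c]).flatMap (fun c =>
     (if c = '?' then [] else [c]).flatMap (fun c =>
     (if c = '*' then ([] : List Char) else [c])))))))))) = (pvBMap c).toList := by
  by_cases h1 : c = '<'; · subst h1; simp [pvBMap]
  by_cases h2 : c = '>'; · subst h2; simp [pvBMap]
  by_cases h3 : c = ':'; · subst h3; simp [pvBMap]
  by_cases h4 : c = '"'; · subst h4; simp [pvBMap]
  by_cases h5 : c = '/'; · subst h5; simp [pvBMap]
  by_cases h6 : c = '\\'; · subst h6; simp [pvBMap]
  by_cases h7 : c = '|'; · subst h7; simp [pvBMap]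
  by_cases h8 : c = '?'; · subst h8; simp [pvBMap]
  by_cases h9 : c = '*'; · subst h9; simp [pvBMap]
  simp [pvBMap, h1, h2, h3, h4, h5, h6, h7, h8, h9, String.toList_ofList]

-- the nine sequential replaces collapse to one flatMap over pvBMap
lemma chain_eq (s : List Char) :
    PySem.Chars.replace (PySem.Chars.replace (PySem.Chars.replace (PySem.Chars.replace
      (PySem.Chars.replace (PySem.Chars.replace (PySem.Chars.replace (PySem.Chars.replace
      (PySem.Chars.replace s ['<'] ['(','l','t',')']) ['>'] ['(','g','t',')'])
      [':'] ['-']) ['"'] ['\'']) ['/'] ['-']) ['\\'] ['-']) ['|'] ['-']) ['?'] []) ['*'] []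
    = s.flatMap (fun c => (pvBMap c).toList) := by
  rw [replace_single, replace_single, replace_single, replace_single, replace_single,
      replace_single, replace_single, replace_single, replace_single]
  simp only [List.flatMap_assoc]
  exact List.flatMap_congr (fun c _ => nine_eq_bmap c)

-- ===== VERDICT (by name: the statement is the Claim_ definition above) =====
set_option maxHeartbeats 1000000 in
theorem sanitize_path_component_spec : Claim_equal_sanitize_path_component := by
  intro name _
  unfold Spec_sanitize_path_component sanitize_path_component sanitize_path_component_alt
  rw [PySem.List.foldl_append_eq_flatMap, List.nil_append]
  rw [← chain_eq name.toList]
  simp [PySem.Str.toList_replace]
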